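-- pv_equiv track=rewrite | github.com/diyage/STREAM | utils/check.py | _get_content_dup_value
-- ===== SOURCE A (Python) =====
-- def _get_content_dup_value(
--     content: str,
--     check_length: int = 10,
--     keep_threshold: int = 100,
-- ) -> int:
--     res = 0
--     max_length = len(content)
--     for i in range(0, max_length):
--         j = i + check_length
--         if j >= max_length:
--             break
--         base_str = content[i:j]
--         for m in range(i + 1, max_length):
--             n = m + check_length
--             if n >= max_length:
--                 break
--             compare_str = content[m:n]
--             if compare_str == base_str:
--                 res += 1
--                 if res >= keep_threshold:
--                     return keep_threshold + 1
--
--     return res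
-- ===== SOURCE B (Python) =====
-- def _get_content_dup_value(
--     content: str,
--     check_length: int = 10,
--     keep_threshold: int = 100,
-- ) -> int:
--     n = len(content)
--     counts = {}
--     for i in range(n):
--         if i + check_length >= n:
--             break
--         s = content[i:i + check_length]
--         counts[s] = counts.get(s, 0) + 1
--     total = 0
--     for c in counts.values():
--         total += c * (c - 1) // 2
--     if total >= keep_threshold and total >= 1:
--         return keep_threshold + 1
--     return total
-- ===== Notes on version B (the rewrite author's own statement) =====
-- stated objective: faster
-- what changed: Replaces the quadratic all-pairs substring comparison by a single pass that counts each length-L window in a dict and sums c*(c-1)//2, applying the same keep_threshold cap arithmetically.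
import Mathlib
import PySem

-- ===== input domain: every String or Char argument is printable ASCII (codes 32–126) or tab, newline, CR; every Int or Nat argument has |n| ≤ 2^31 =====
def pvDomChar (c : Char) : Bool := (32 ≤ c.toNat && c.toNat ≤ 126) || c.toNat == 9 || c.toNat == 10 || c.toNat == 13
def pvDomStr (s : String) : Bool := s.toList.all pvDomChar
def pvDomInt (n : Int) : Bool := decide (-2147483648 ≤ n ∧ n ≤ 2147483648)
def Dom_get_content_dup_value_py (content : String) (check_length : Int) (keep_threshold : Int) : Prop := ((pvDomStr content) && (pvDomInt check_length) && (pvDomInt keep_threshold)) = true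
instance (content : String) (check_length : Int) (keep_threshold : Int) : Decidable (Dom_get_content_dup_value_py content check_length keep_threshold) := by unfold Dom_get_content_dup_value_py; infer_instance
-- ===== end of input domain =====

-- B replaces A's quadratic all-pairs substring comparison by one dict-counting pass plus a sum of c*(c-1)//2, with the same threshold cap.

-- ===== PORT A =====
-- Both 'break's exit on a guard (i/m + check_length ≥ max_length) that is monotone in the
-- loop variable, so once it fires every later iteration would be skipped too: the break is
-- modelled by skipping guarded iterations.  The early 'return keep_threshold + 1' is
-- modelled by the Bool flag in the fold state (once true, every later step returns the
-- state unchanged, and the final result is keep_threshold + 1).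
def pvAInner (cs : List Char) (check_length max_length keep_threshold : Int)
    (base_str : List Char) (st : Int × Bool) (m : Int) : Int × Bool :=
  if st.2 then st
  else if m + check_length ≥ max_length then st
  else if PySem.List.slice cs (some m) (some (m + check_length)) = base_str then
    (if st.1 + 1 ≥ keep_threshold then (st.1 + 1, true) else (st.1 + 1, false))
  else st

def pvAOuterStep (cs : List Char) (check_length max_length keep_threshold : Int)
    (st : Int × Bool) (i : Int) : Int × Bool :=
  if st.2 then st
  else if i + check_length ≥ max_length then st
  else
    let base_str := PySem.List.slice cs (some i) (some (i + check_length))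
    (PySem.List.pyRange (i + 1) max_length 1).foldl
      (pvAInner cs check_length max_length keep_threshold base_str) st

def get_content_dup_value_py (content : String) (check_length : Int) (keep_threshold : Int) : Int :=
  let cs := content.toList
  let max_length : Int := cs.length
  let st := (PySem.List.pyRange 0 max_length 1).foldl
    (pvAOuterStep cs check_length max_length keep_threshold) ((0 : Int), false)
  if st.2 then keep_threshold + 1 else st.1

-- ===== PORT B =====
def get_content_dup_value_py_alt (content : String) (check_length : Int) (keep_threshold : Int) : Int :=
  let cs := content.toList
  let n : Int := cs.length
  -- the 'break' again exits on a guard monotone in i, so it is modelled by skipping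
  let counts : PySem.Dict (List Char) Int :=
    (PySem.List.pyRange 0 n 1).foldl (fun d i =>
      if i + check_length ≥ n then d
      else
        let s := PySem.List.slice cs (some i) (some (i + check_length))
        d.insert s (d.getD s 0 + 1)) PySem.Dict.empty
  let total := counts.values.foldl
    (fun acc c => acc + PySem.Int.floordiv (c * (c - 1)) 2) 0
  if total ≥ keep_threshold ∧ total ≥ 1 then keep_threshold + 1 else total

-- ===== PRECONDITION & SPEC =====
def Spec_get_content_dup_value_py (content : String) (check_length : Int) (keep_threshold : Int) (out : Int) : Prop := out = get_content_dup_value_py_alt content check_length keep_threshold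
instance (content : String) (check_length : Int) (keep_threshold : Int) (out : Int) : Decidable (Spec_get_content_dup_value_py content check_length keep_threshold out) := by unfold Spec_get_content_dup_value_py; infer_instance

-- ===== CLAIM (what is proved, stated in full; the proofs are below) =====
def Claim_equal_get_content_dup_value_py : Prop := ∀ (content : String) (check_length : Int) (keep_threshold : Int), Dom_get_content_dup_value_py content check_length keep_threshold → Spec_get_content_dup_value_py content check_length keep_threshold (get_content_dup_value_py content check_length keep_threshold)

-- ===== LEMMAS AND PROOFS =====

/-- the slice taken at start index `i`. -/
def pvSl (cs : List Char) (L i : Int) : List Char :=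
  PySem.List.slice cs (some i) (some (i + L))

/-- the bound below which loop indices are "active" (their guard is false). -/
def pvM (cs : List Char) (L : Int) : Int :=
  max 0 (min (cs.length : Int) ((cs.length : Int) - L))

/-- the list of slices taken at the active indices. -/
def pvSS (cs : List Char) (L : Int) : List (List Char) :=
  (PySem.List.pyRange 0 (pvM cs L) 1).map (pvSl cs L)

/-- abstract form of A's inner-loop body on a slice value. -/
def pvInnerF (keep : Int) (base : List Char) (st : Int × Bool) (x : List Char) : Int × Bool :=
  if st.2 then st
  else if x = base then
    (if st.1 + 1 ≥ keep then (st.1 + 1, true) else (st.1 + 1, false))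
  else st

/-- abstract form of A's double loop, recursing on the list of slice values. -/
def pvOuterA (keep : Int) : List (List Char) → (Int × Bool) → (Int × Bool)
  | [], st => st
  | x :: t, st => pvOuterA keep t (if st.2 then st else t.foldl (pvInnerF keep x) st)

/-- number of duplicate pairs (i < j with equal entries) in a list. -/
def pvPC : List (List Char) → Nat
  | [] => 0
  | x :: t => t.count x + pvPC t

lemma pvInnerF_flag (keep : Int) (base : List Char) (l : List (List Char)) (r : Int) :
    l.foldl (pvInnerF keep base) (r, true) = (r, true) := by
  induction l with
  | nil => rfl
  | cons y t ih => simpa [pvInnerF] using ih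

lemma pvOuterA_flag (keep : Int) (l : List (List Char)) (r : Int) :
    pvOuterA keep l (r, true) = (r, true) := by
  induction l with
  | nil => rfl
  | cons y t ih => simpa [pvOuterA] using ih

lemma pvInnerF_go (keep : Int) (x : List Char) (l : List (List Char)) :
    ∀ r : Int, 0 ≤ r → r < max keep 1 →
    l.foldl (pvInnerF keep x) (r, false) =
      if keep ≤ r + l.count x ∧ 1 ≤ l.count x then (max keep 1, true)
      else (r + (l.count x : Int), false) := by
  induction l with
  | nil =>
    intro r h0 hr
    simp
  | cons y t ih =>
    intro r h0 hr
    rw [List.foldl_cons]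
    by_cases hyx : y = x
    · subst hyx
      have hc1 : ((y :: t).count y : Int) = (t.count y : Int) + 1 := by
        simp [List.count_cons_self]
      have hstep : pvInnerF keep y (r, false) y =
          if keep ≤ r + 1 then (r + 1, true) else (r + 1, false) := by
        simp only [pvInnerF, ge_iff_le]
        norm_num
      by_cases htr : keep ≤ r + 1
      · rw [hstep, if_pos htr, pvInnerF_flag]
        have hcnt0 : (0 : Int) ≤ (t.count y : Int) := by positivity
        rw [if_pos ⟨by omega, by simp [List.count_cons_self]⟩]
        have : r + 1 = max keep 1 := by omega
        rw [this]
      · rw [hstep, if_neg htr, ih (r + 1) (by omega) (by omega)]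
        have hcnt0 : (0 : Int) ≤ (t.count y : Int) := by positivity
        rcases Nat.eq_zero_or_pos (t.count y) with hz | hp
        · have hz' : (t.count y : Int) = 0 := by exact_mod_cast hz
          rw [if_neg (by omega), if_neg (by rw [hc1]; omega)]
          rw [hc1]; ring_nf
        · have hp' : (1 : Int) ≤ (t.count y : Int) := by exact_mod_cast hp
          by_cases hcc : keep ≤ r + 1 + (t.count y : Int)
          · rw [if_pos ⟨hcc, hp⟩, if_pos ⟨by rw [hc1]; omega, by simp [List.count_cons_self]⟩]
          · rw [if_neg (by omega), if_neg (by rw [hc1]; omega)]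
            rw [hc1]; ring_nf
    · have hstep : pvInnerF keep x (r, false) y = (r, false) := by
        simp [pvInnerF, hyx]
      rw [hstep, ih r h0 hr]
      simp [List.count_cons_of_ne hyx]

lemma pvOuterA_go (keep : Int) (l : List (List Char)) :
    ∀ r : Int, 0 ≤ r → r < max keep 1 →
    pvOuterA keep l (r, false) =
      if max keep 1 ≤ r + pvPC l then (max keep 1, true)
      else (r + (pvPC l : Int), false) := by
  induction l with
  | nil =>
    intro r h0 hr
    rw [pvOuterA, if_neg (by simp [pvPC]; omega)]
    simp [pvPC]
  | cons x t ih =>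
    intro r h0 hr
    rw [pvOuterA, if_neg (by simp), pvInnerF_go keep x t r h0 hr]
    have hpc : (pvPC (x :: t) : Int) = (t.count x : Int) + (pvPC t : Int) := by
      rw [pvPC]; push_cast; ring
    have hpc0 : (0 : Int) ≤ (pvPC t : Int) := by positivity
    have hc0 : (0 : Int) ≤ (t.count x : Int) := by positivity
    by_cases hc : keep ≤ r + t.count x ∧ 1 ≤ t.count x
    · rw [if_pos hc, pvOuterA_flag]
      have h1 : (1 : Int) ≤ (t.count x : Int) := by exact_mod_cast hc.2
      rw [if_pos (by rw [hpc]; omega)]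
    · rw [if_neg hc]
      have hlt : r + (t.count x : Int) < max keep 1 := by
        rcases Nat.eq_zero_or_pos (t.count x) with hz | hp
        · have hz' : (t.count x : Int) = 0 := by exact_mod_cast hz
          omega
        · have hp' : (1 : Int) ≤ (t.count x : Int) := by exact_mod_cast hp
          have hnk : ¬ keep ≤ r + t.count x := fun h => hc ⟨h, hp⟩
          omega
      rw [ih (r + t.count x) (by omega) hlt]
      by_cases hcc : max keep 1 ≤ r + (t.count x : Int) + pvPC t
      · rw [if_pos hcc, if_pos (by rw [hpc]; omega)]
      · rw [if_neg hcc, if_neg (by rw [hpc]; omega)]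
        rw [hpc]; ring_nf

lemma pvM_nonneg (cs : List Char) (L : Int) : 0 ≤ pvM cs L :=
  le_max_left 0 _

lemma pvM_le_len (cs : List Char) (L : Int) : pvM cs L ≤ (cs.length : Int) :=
  max_le (by positivity) (min_le_left _ _)

lemma pvM_active (cs : List Char) (L i : Int) (h0 : 0 ≤ i) (h : i < pvM cs L) :
    i + L < (cs.length : Int) := by
  rcases lt_max_iff.mp h with h' | h'
  · omega
  · have := lt_min_iff.mp h'
    omega

lemma pvM_guard (cs : List Char) (L i : Int) (h1 : pvM cs L ≤ i)
    (h2 : i < (cs.length : Int)) : (cs.length : Int) ≤ i + L := by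
  have hm : min (cs.length : Int) ((cs.length : Int) - L) ≤ i :=
    le_trans (le_max_right 0 _) h1
  rcases min_le_iff.mp hm with h' | h' <;> omega

lemma pvAInner_guard (cs : List Char) (L n keep : Int) (base : List Char)
    (st : Int × Bool) (m : Int) (h : n ≤ m + L) :
    pvAInner cs L n keep base st m = st := by
  rcases st with ⟨r, f⟩
  cases f <;> simp [pvAInner, h]

lemma pvAInner_active (cs : List Char) (L n keep : Int) (base : List Char)
    (st : Int × Bool) (m : Int) (h : m + L < n) :
    pvAInner cs L n keep base st m = pvInnerF keep base st (pvSl cs L m) := by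
  rcases st with ⟨r, f⟩
  cases f <;> simp [pvAInner, pvInnerF, pvSl, not_le.mpr h]

lemma pvAInner_tail_id (cs : List Char) (L keep : Int) (base : List Char)
    (st' : Int × Bool) :
    (PySem.List.pyRange (pvM cs L) (cs.length : Int) 1).foldl
      (pvAInner cs L (cs.length : Int) keep base) st' = st' := by
  have h := PySem.List.foldl_congr_mem
    (PySem.List.pyRange (pvM cs L) (cs.length : Int) 1)
    (pvAInner cs L (cs.length : Int) keep base)
    (fun acc _ => acc) st'
    (by
      intro acc x hx
      rcases PySem.List.mem_pyRange_one.mp hx with ⟨hx1, hx2⟩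
      exact pvAInner_guard _ _ _ _ _ _ _ (pvM_guard cs L x hx1 hx2))
  rw [h, PySem.List.foldl_ignore]

/-- A's outer fold over active indices equals the abstract double loop over the slices. -/
lemma pvA_fold_active (cs : List Char) (L keep : Int) :
    ∀ (k : Nat) (a : Int) (st : Int × Bool), pvM cs L ≤ a + k → 0 ≤ a →
    (PySem.List.pyRange a (pvM cs L) 1).foldl
        (pvAOuterStep cs L (cs.length : Int) keep) st =
      pvOuterA keep ((PySem.List.pyRange a (pvM cs L) 1).map (pvSl cs L)) st := by
  intro k
  induction k with
  | zero =>
    intro a st hk _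
    rw [PySem.List.pyRange_one_eq_nil (by omega)]
    rfl
  | succ k ih =>
    intro a st hk ha
    by_cases hlt : a < pvM cs L
    · rw [PySem.List.pyRange_one_cons hlt, List.foldl_cons, List.map_cons]
      have hg : ¬ (cs.length : Int) ≤ a + L := not_le.mpr (pvM_active cs L a ha hlt)
      have hstep : pvAOuterStep cs L (cs.length : Int) keep st a =
          if st.2 then st
          else ((PySem.List.pyRange (a + 1) (pvM cs L) 1).map (pvSl cs L)).foldl
            (pvInnerF keep (pvSl cs L a)) st := by
        rcases st with ⟨r, f⟩
        cases f with
        | true => simp [pvAOuterStep]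
        | false =>
          rw [pvAOuterStep]
          rw [if_neg (by simp), if_neg (by simpa using hg), if_neg (by simp)]
          rw [PySem.List.pyRange_one_append (a + 1) (pvM cs L) (cs.length : Int)
            (by omega) (pvM_le_len cs L), List.foldl_append]
          rw [pvAInner_tail_id]
          have hcg := PySem.List.foldl_congr_mem
            (PySem.List.pyRange (a + 1) (pvM cs L) 1)
            (pvAInner cs L (cs.length : Int) keep
              (PySem.List.slice cs (some a) (some (a + L))))
            (fun st' m => pvInnerF keep (pvSl cs L a) st' (pvSl cs L m))
            ((r, false) : Int × Bool)
            (by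
              intro acc x hx
              rcases PySem.List.mem_pyRange_one.mp hx with ⟨hx1, hx2⟩
              exact pvAInner_active _ _ _ _ _ _ _ (pvM_active cs L x (by omega) hx2))
          rw [hcg, ← List.foldl_map]
      rw [hstep]
      rw [show pvOuterA keep
            (pvSl cs L a :: (PySem.List.pyRange (a + 1) (pvM cs L) 1).map (pvSl cs L)) st =
          pvOuterA keep ((PySem.List.pyRange (a + 1) (pvM cs L) 1).map (pvSl cs L))
            (if st.2 then st
             else ((PySem.List.pyRange (a + 1) (pvM cs L) 1).map (pvSl cs L)).foldl
               (pvInnerF keep (pvSl cs L a)) st) from by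
        rcases st with ⟨r, f⟩; cases f <;> rfl]
      exact ih (a + 1) _ (by push_cast at hk ⊢; omega) (by omega)
    · rw [PySem.List.pyRange_one_eq_nil (by omega)]
      rfl

/-- closed characterisation of port A. -/
lemma pvA_eq (content : String) (L keep : Int) :
    get_content_dup_value_py content L keep =
      if max keep 1 ≤ (pvPC (pvSS content.toList L) : Int) then keep + 1
      else (pvPC (pvSS content.toList L) : Int) := by
  simp only [get_content_dup_value_py]
  set cs := content.toList with hcs
  rw [PySem.List.pyRange_one_append 0 (pvM cs L) (cs.length : Int)
    (pvM_nonneg cs L) (pvM_le_len cs L), List.foldl_append]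
  rw [pvA_fold_active cs L keep (pvM cs L).toNat 0 ((0 : Int), false)
    (by have := pvM_nonneg cs L; omega) le_rfl]
  have htail := PySem.List.foldl_congr_mem
    (PySem.List.pyRange (pvM cs L) (cs.length : Int) 1)
    (pvAOuterStep cs L (cs.length : Int) keep)
    (fun acc _ => acc)
    (pvOuterA keep ((PySem.List.pyRange 0 (pvM cs L) 1).map (pvSl cs L)) ((0 : Int), false))
    (by
      intro acc x hx
      rcases PySem.List.mem_pyRange_one.mp hx with ⟨hx1, hx2⟩
      have hg : (cs.length : Int) ≤ x + L := pvM_guard cs L x hx1 hx2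
      rcases acc with ⟨r, f⟩
      cases f <;> simp [pvAOuterStep, hg])
  rw [htail, PySem.List.foldl_ignore]
  rw [show (PySem.List.pyRange 0 (pvM cs L) 1).map (pvSl cs L) = pvSS cs L from rfl]
  rw [pvOuterA_go keep (pvSS cs L) 0 le_rfl (by omega)]
  have hpc0 : (0 : Int) ≤ (pvPC (pvSS cs L) : Int) := by positivity
  by_cases hc : max keep 1 ≤ (pvPC (pvSS cs L) : Int)
  · rw [if_pos (show max keep 1 ≤ 0 + (pvPC (pvSS cs L) : Int) by omega), if_pos hc]
    simp
  · rw [if_neg (show ¬ max keep 1 ≤ 0 + (pvPC (pvSS cs L) : Int) by omega), if_neg hc]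
    simp

/-- floordiv form of the triangular-number step. -/
lemma pvTri_succ (c : Nat) :
    PySem.Int.floordiv (((c : Int) + 1) * (((c : Int) + 1) - 1)) 2 =
      PySem.Int.floordiv ((c : Int) * ((c : Int) - 1)) 2 + c := by
  rw [PySem.Int.floordiv_eq_ediv_of_pos (by norm_num),
      PySem.Int.floordiv_eq_ediv_of_pos (by norm_num)]
  obtain ⟨k, hk⟩ : Even ((c : Int) * ((c : Int) - 1)) := by
    have h : (c : Int) * ((c : Int) - 1) = ((c : Int) - 1) * (((c : Int) - 1) + 1) := by ring
    rw [h]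
    exact Int.even_mul_succ_self _
  have hexp : ((c : Int) + 1) * (((c : Int) + 1) - 1) = (c : Int) * ((c : Int) - 1) + 2 * c := by
    ring
  rw [hexp, hk]
  omega

/-- Finset form: the duplicate pair count is the sum of C(count,2). -/
lemma pvPC_finset (ss : List (List Char)) :
    (∑ k ∈ ss.toFinset,
      PySem.Int.floordiv ((ss.count k : Int) * ((ss.count k : Int) - 1)) 2) =
      (pvPC ss : Int) := by
  induction ss with
  | nil => simp [pvPC]
  | cons x t ih =>
    have hcount : ∀ k : List Char, (((x :: t).count k : Int)) =
        (t.count k : Int) + (if k = x then 1 else 0) := by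
      intro k
      by_cases hk : k = x
      · subst hk; simp [List.count_cons_self]
      · simp [List.count_cons, hk]
        exact fun h => hk h.symm
    by_cases hx : x ∈ t
    · have hins : (x :: t).toFinset = t.toFinset := by
        rw [List.toFinset_cons]
        exact Finset.insert_eq_self.mpr (List.mem_toFinset.mpr hx)
      rw [hins]
      have hsum : (∑ k ∈ t.toFinset,
          PySem.Int.floordiv (((x :: t).count k : Int) * (((x :: t).count k : Int) - 1)) 2) =
          (∑ k ∈ t.toFinset,
            (PySem.Int.floordiv ((t.count k : Int) * ((t.count k : Int) - 1)) 2 +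
              (if k = x then (t.count x : Int) else 0))) := by
        apply Finset.sum_congr rfl
        intro k _
        by_cases hk : k = x
        · subst hk
          rw [hcount k, if_pos rfl, if_pos rfl]
          exact pvTri_succ (t.count k)
        · rw [hcount k, if_neg hk, if_neg hk]
          ring_nf
      rw [hsum, Finset.sum_add_distrib, ih,
        Finset.sum_ite_eq' t.toFinset x (fun _ => (t.count x : Int)),
        if_pos (List.mem_toFinset.mpr hx)]
      rw [pvPC]
      push_cast
      ring
    · have hxf : x ∉ t.toFinset := fun h => hx (List.mem_toFinset.mp h)
      rw [List.toFinset_cons, Finset.sum_insert hxf]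
      have hx0 : (x :: t).count x = 1 := by
        rw [List.count_cons_self, List.count_eq_zero_of_not_mem hx]
      have hterm : PySem.Int.floordiv
          (((x :: t).count x : Int) * (((x :: t).count x : Int) - 1)) 2 = 0 := by
        rw [hx0]; decide
      have hrest : (∑ k ∈ t.toFinset,
          PySem.Int.floordiv (((x :: t).count k : Int) * (((x :: t).count k : Int) - 1)) 2) =
          (∑ k ∈ t.toFinset,
            PySem.Int.floordiv ((t.count k : Int) * ((t.count k : Int) - 1)) 2) := by
        apply Finset.sum_congr rfl
        intro k hk
        have hkx : k ≠ x := fun h => hxf (h ▸ hk)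
        rw [hcount k, if_neg hkx]
        ring_nf
      rw [hterm, hrest, ih]
      rw [pvPC, List.count_eq_zero_of_not_mem hx]
      push_cast
      ring
  
/-- list-sum over the dedup'd keys equals the Finset sum. -/
lemma pvSum_ofList (ss : List (List Char)) :
    ((PySem.Set.ofList ss).map (fun k =>
      PySem.Int.floordiv ((ss.count k : Int) * ((ss.count k : Int) - 1)) 2)).sum =
      (pvPC ss : Int) := by
  rw [← pvPC_finset ss]
  have hnd : (PySem.Set.ofList ss).Nodup := PySem.Set.nodup_ofList ss
  have hfs : (PySem.Set.ofList ss).toFinset = ss.toFinset := by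
    ext k
    simp [List.mem_toFinset, PySem.Set.mem_ofList]
  rw [← hfs, List.sum_toFinset _ hnd]

/-- closed characterisation of port B. -/
lemma pvB_eq (content : String) (L keep : Int) :
    get_content_dup_value_py_alt content L keep =
      if (pvPC (pvSS content.toList L) : Int) ≥ keep ∧ (pvPC (pvSS content.toList L) : Int) ≥ 1
      then keep + 1 else (pvPC (pvSS content.toList L) : Int) := by
  simp only [get_content_dup_value_py_alt]
  set cs := content.toList with hcs
  rw [PySem.List.pyRange_one_append 0 (pvM cs L) (cs.length : Int)
    (pvM_nonneg cs L) (pvM_le_len cs L), List.foldl_append]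
  have hhead := PySem.List.foldl_congr_mem
    (PySem.List.pyRange 0 (pvM cs L) 1)
    (fun (d : PySem.Dict (List Char) Int) i =>
      if i + L ≥ (cs.length : Int) then d
      else
        let s := PySem.List.slice cs (some i) (some (i + L))
        d.insert s (d.getD s 0 + 1))
    (fun (d : PySem.Dict (List Char) Int) i =>
      d.insert (pvSl cs L i) (d.getD (pvSl cs L i) 0 + 1))
    PySem.Dict.empty
    (by
      intro acc x hx
      rcases PySem.List.mem_pyRange_one.mp hx with ⟨hx1, hx2⟩
      have hg : ¬ (cs.length : Int) ≤ x + L := not_le.mpr (pvM_active cs L x hx1 hx2)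
      simp only [ge_iff_le, hg, if_false]
      rfl)
  rw [hhead]
  have htail := PySem.List.foldl_congr_mem
    (PySem.List.pyRange (pvM cs L) (cs.length : Int) 1)
    (fun (d : PySem.Dict (List Char) Int) i =>
      if i + L ≥ (cs.length : Int) then d
      else
        let s := PySem.List.slice cs (some i) (some (i + L))
        d.insert s (d.getD s 0 + 1))
    (fun (d : PySem.Dict (List Char) Int) _ => d)
    ((PySem.List.pyRange 0 (pvM cs L) 1).foldl
      (fun (d : PySem.Dict (List Char) Int) i =>
        d.insert (pvSl cs L i) (d.getD (pvSl cs L i) 0 + 1)) PySem.Dict.empty)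
    (by
      intro acc x hx
      rcases PySem.List.mem_pyRange_one.mp hx with ⟨hx1, hx2⟩
      have hg : (cs.length : Int) ≤ x + L := pvM_guard cs L x hx1 hx2
      simp only [ge_iff_le, hg, if_true])
  rw [htail, PySem.List.foldl_ignore]
  have hmap : (pvSS cs L).foldl
      (fun (d : PySem.Dict (List Char) Int) s => d.insert s (d.getD s 0 + 1))
      PySem.Dict.empty =
      (PySem.List.pyRange 0 (pvM cs L) 1).foldl
        (fun (d : PySem.Dict (List Char) Int) i =>
          d.insert (pvSl cs L i) (d.getD (pvSl cs L i) 0 + 1)) PySem.Dict.empty := by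
    rw [pvSS, List.foldl_map]
  rw [← hmap]
  rw [PySem.Dict.foldl_insert_getD_add_one_eq_counter]
  rw [show (PySem.Dict.counter (pvSS cs L)).values =
      ((PySem.Dict.counter (pvSS cs L)).items).map (·.2) from rfl]
  rw [PySem.Dict.items_counter, List.map_map, PySem.List.foldl_add, List.map_map]
  rw [show ((fun c : Int => PySem.Int.floordiv (c * (c - 1)) 2) ∘
      ((fun p : (List Char) × Int => p.2) ∘ fun k => (k, ((pvSS cs L).count k : Int)))) =
    (fun k => PySem.Int.floordiv (((pvSS cs L).count k : Int) *
      (((pvSS cs L).count k : Int) - 1)) 2) from rfl]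
  rw [pvSum_ofList (pvSS cs L), zero_add]

-- ===== VERDICT (by name: the statement is the Claim_ definition above) =====
theorem get_content_dup_value_py_spec : Claim_equal_get_content_dup_value_py := by
  intro content L keep _
  show get_content_dup_value_py content L keep = get_content_dup_value_py_alt content L keep
  rw [pvA_eq, pvB_eq]
  have h0 : (0 : Int) ≤ (pvPC (pvSS content.toList L) : Int) := by positivity
  split_ifs with h1 h2 h2 <;> omega
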